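-- pv_equiv track=rewrite | github.com/mjallen729/Python-Projects | Random Scripts/PhoneNum.py | fone
-- ===== SOURCE A (Python) =====
-- def fone(s):
--     trim = str()
--     nums = 0
--
--     for c in s:
--         if c.isdigit():
--             trim += c
--             nums += 1
--
--         if nums % 3 == 0 and len(trim) > 0 and trim[-1] != '-':
--             trim += '-'
--
--     if trim[-1] == '-':
--         trim = trim[:-1]
--
--     return trim
-- ===== SOURCE B (Python) =====
-- def fone(s):
--     digits = [c for c in s if c.isdigit()]
--     out = ''
--     while digits:
--         out += ''.join(digits[:3]) + '-'
--         digits = digits[3:]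
--     if out[-1] == '-':
--         out = out[:-1]
--     return out
-- ===== Notes on version B (the rewrite author's own statement) =====
-- stated objective: simpler
-- what changed: B extracts the digits once with a comprehension and then consumes them three at a time, emitting each group with a trailing dash and stripping the final dash at the end, replacing A's per-character loop that threads a digit counter and decides on every character whether to insert a dash; Pre_ excludes strings with no digits, on which both programs raise IndexError.
import Mathlib
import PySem

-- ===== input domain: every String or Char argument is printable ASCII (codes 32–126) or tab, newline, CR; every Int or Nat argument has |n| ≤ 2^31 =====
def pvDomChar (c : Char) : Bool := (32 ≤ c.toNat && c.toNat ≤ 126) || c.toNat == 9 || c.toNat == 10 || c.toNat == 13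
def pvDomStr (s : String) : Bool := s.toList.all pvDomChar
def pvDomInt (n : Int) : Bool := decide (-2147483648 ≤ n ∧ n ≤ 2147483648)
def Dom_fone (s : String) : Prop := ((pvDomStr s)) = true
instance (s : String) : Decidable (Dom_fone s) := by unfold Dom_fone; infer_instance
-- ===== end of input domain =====

-- B extracts the digits once and consumes them three at a time (group + dash, final dash
-- stripped); A interleaves a per-character digit counter with conditional dash insertion.
-- Objective: simpler.  On digitless input both raise IndexError: outside Pre_fone.

-- ===== PORT A =====
-- one loop iteration: append digit & count, then maybe append a dash
def foneStep (st : List Char × Int) (c : Char) : List Char × Int :=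
  let st1 := if PySem.Chars.isdigit c then (st.1 ++ [c], st.2 + 1) else st
  if PySem.Int.mod st1.2 3 = 0 ∧ 0 < st1.1.length ∧ PySem.List.pyGet? st1.1 (-1) ≠ some '-'
  then (st1.1 ++ ['-'], st1.2) else st1

def fone (s : String) : String :=
  let st := s.toList.foldl foneStep ([], (0 : Int))
  match PySem.List.pyGet? st.1 (-1) with          -- trim[-1]; none = IndexError, excluded by Pre_fone
  | some c => if c = '-' then String.ofList (PySem.List.slice st.1 none (some (-1))) else String.ofList st.1
  | none => ""

-- ===== PORT B =====
-- while digits: out += digits[:3] + '-'; digits = digits[3:]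
def chunkOut : List Char → List Char
  | [] => []
  | a :: rest => (a :: rest.take 2) ++ '-' :: chunkOut (rest.drop 2)
termination_by l => l.length
decreasing_by simp

def fone_alt (s : String) : String :=
  let digits := s.toList.filter PySem.Chars.isdigit
  let out := chunkOut digits
  match PySem.List.pyGet? out (-1) with            -- out[-1]; none = IndexError, excluded by Pre_fone
  | some c => if c = '-' then String.ofList (PySem.List.slice out none (some (-1))) else String.ofList out
  | none => ""

-- ===== PRECONDITION & SPEC =====
-- Pre_ excludes exactly the strings with no digit: there A's final trim[-1] raises IndexError.
def Pre_fone (s : String) : Prop := s.toList.any PySem.Chars.isdigit = true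
instance (s : String) : Decidable (Pre_fone s) := by unfold Pre_fone; infer_instance
def pvWitness_fone : String := "a1b2c3d4"

def Spec_fone (s : String) (out : String) : Prop := out = fone_alt s
instance (s : String) (out : String) : Decidable (Spec_fone s out) := by unfold Spec_fone; infer_instance

-- ===== CLAIM (what is proved, stated in full; the proofs are below) =====
def Claim_equal_fone : Prop := ∀ (s : String), Dom_fone s → Pre_fone s → Spec_fone s (fone s)

-- ===== LEMMAS AND PROOFS =====

-- the value of A's trim variable over the digit list d, BEFORE the final dash strip
def preT : List Char → List Char
  | [] => []
  | [a] => [a]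
  | [a, b] => [a, b]
  | a :: b :: c :: rest => a :: b :: c :: '-' :: preT rest

lemma isdigit_ne_dash {c : Char} (h : PySem.Chars.isdigit c = true) : c ≠ '-' := by
  rintro rfl; simp [PySem.Chars.isdigit] at h

lemma chunkOut_cons3 (a b c : Char) (rest : List Char) :
    chunkOut (a :: b :: c :: rest) = a :: b :: c :: '-' :: chunkOut rest := by
  rw [chunkOut]; simp

lemma preT_ne_nil : ∀ (d : List Char), d ≠ [] → preT d ≠ []
  | [_], _ => by simp [preT]
  | [_, _], _ => by simp [preT]
  | _ :: _ :: _ :: _, _ => by simp [preT]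

lemma chunkOut_eq : ∀ (d : List Char), d ≠ [] →
    chunkOut d = preT d ++ (if d.length % 3 = 0 then [] else ['-']) := by
  intro d
  induction d using preT.induct with
  | case1 => intro h; exact absurd rfl h
  | case2 a => intro _; rw [chunkOut]; simp [preT]; rw [chunkOut]
  | case3 a b => intro _; rw [chunkOut]; simp [preT]; rw [chunkOut]
  | case4 a b c rest ih =>
    intro _
    by_cases hr : rest = []
    · subst hr; rw [chunkOut_cons3, chunkOut]; simp [preT]
    · rw [chunkOut_cons3, ih hr, preT]
      have hlen : (a :: b :: c :: rest).length % 3 = rest.length % 3 := by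
        simp [List.length_cons]; omega
      rw [hlen]
      simp

lemma getLast?_preT : ∀ (d : List Char), d ≠ [] →
    (preT d).getLast? = if d.length % 3 = 0 then some '-' else d.getLast? := by
  intro d
  induction d using preT.induct with
  | case1 => intro h; exact absurd rfl h
  | case2 a => intro _; simp [preT]
  | case3 a b => intro _; simp [preT]
  | case4 a b c rest ih =>
    intro _
    by_cases hr : rest = []
    · subst hr; simp [preT]
    · have hpr : preT rest ≠ [] := preT_ne_nil rest hr
      have hlen : (a :: b :: c :: rest).length % 3 = rest.length % 3 := by
        simp [List.length_cons]; omega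
      rw [preT, hlen]
      obtain ⟨p, ps, hps⟩ := List.exists_cons_of_ne_nil hpr
      obtain ⟨q, qs, hqs⟩ := List.exists_cons_of_ne_nil hr
      have h1 : (a :: b :: c :: '-' :: preT rest).getLast? = (preT rest).getLast? := by
        rw [hps]; simp [List.getLast?_cons_cons]
      have h2 : (a :: b :: c :: rest).getLast? = rest.getLast? := by
        rw [hqs]; simp [List.getLast?_cons_cons]
      rw [h1, ih hr, h2]

lemma preT_snoc (d : List Char) (c : Char) :
    preT (d ++ [c]) = preT d ++ [c] ++ (if (d.length + 1) % 3 = 0 then ['-'] else []) := by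
  induction d using preT.induct with
  | case1 => simp [preT]
  | case2 a => simp [preT]
  | case3 a b => simp [preT]
  | case4 a b e rest ih =>
    have hlen : ((a :: b :: e :: rest).length + 1) % 3 = (rest.length + 1) % 3 := by
      simp [List.length_cons]; omega
    show preT (a :: b :: e :: (rest ++ [c])) = _
    rw [preT, ih, preT, hlen]
    simp

lemma step_digit (d : List Char) (c : Char) (hc : PySem.Chars.isdigit c = true) :
    foneStep (preT d, (d.length : Int)) c = (preT (d ++ [c]), ((d ++ [c]).length : Int)) := by
  unfold foneStep
  simp only [hc, reduceIte]
  have hget : PySem.List.pyGet? (preT d ++ [c]) (-1) = some c :=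
    PySem.List.pyGet?_neg_one_append_singleton _ _
  have hmod : PySem.Int.mod ((d.length : Int) + 1) 3 = ((d.length : Int) + 1) % 3 :=
    PySem.Int.mod_eq_emod_of_pos (by omega)
  by_cases h3 : (d.length + 1) % 3 = 0
  · have : PySem.Int.mod ((d.length : Int) + 1) 3 = 0 := by rw [hmod]; omega
    rw [if_pos ⟨this, by simp, by rw [hget]; simp [isdigit_ne_dash hc]⟩]
    rw [preT_snoc, if_pos h3]
    simp
  · have : ¬ (PySem.Int.mod ((d.length : Int) + 1) 3 = 0 ∧ 0 < (preT d ++ [c]).length ∧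
        PySem.List.pyGet? (preT d ++ [c]) (-1) ≠ some '-') := by
      rintro ⟨hm, -, -⟩; rw [hmod] at hm; omega
    rw [if_neg this, preT_snoc, if_neg h3]
    simp

lemma step_nondigit (d : List Char) (c : Char) (hc : ¬ PySem.Chars.isdigit c = true) :
    foneStep (preT d, (d.length : Int)) c = (preT d, (d.length : Int)) := by
  unfold foneStep
  simp only [hc, reduceIte, Bool.false_eq_true]
  by_cases hd : d = []
  · subst hd
    rw [if_neg]; rintro ⟨-, h, -⟩; simp [preT] at h
  · by_cases h3 : d.length % 3 = 0
    · rw [if_neg]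
      rintro ⟨-, -, h⟩
      apply h
      rw [PySem.List.pyGet?_neg_one, getLast?_preT d hd, if_pos h3]
    · rw [if_neg]
      rintro ⟨hm, -, -⟩
      rw [PySem.Int.mod_eq_emod_of_pos (by omega)] at hm
      omega

lemma fold_main : ∀ (l : List Char) (d : List Char),
    l.foldl foneStep (preT d, (d.length : Int)) =
      (preT (d ++ l.filter PySem.Chars.isdigit),
        (((d ++ l.filter PySem.Chars.isdigit).length : Int))) := by
  intro l
  induction l with
  | nil => intro d; simp
  | cons c l' ih =>
    intro d
    by_cases hc : PySem.Chars.isdigit c = true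
    · rw [List.foldl_cons, step_digit d c hc, ih (d ++ [c])]
      simp [hc]
    · rw [List.foldl_cons, step_nondigit d c hc, ih d]
      simp [hc]

lemma fone_eq_preT (s : String) :
    s.toList.foldl foneStep ([], (0 : Int)) =
      (preT (s.toList.filter PySem.Chars.isdigit),
        ((s.toList.filter PySem.Chars.isdigit).length : Int)) := by
  have := fold_main s.toList []
  simpa [preT] using this

-- ===== VERDICT (by name: the statement is the Claim_ definition above) =====
theorem fone_spec : Claim_equal_fone := by
  intro s _ hpre
  unfold Spec_fone fone fone_alt
  rw [fone_eq_preT]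
  dsimp only
  set D := s.toList.filter PySem.Chars.isdigit with hD
  have hDne : D ≠ [] := by
    unfold Pre_fone at hpre
    rw [List.any_eq_true] at hpre
    obtain ⟨c, hmem, hc⟩ := hpre
    intro h
    have : c ∈ D := by rw [hD, List.mem_filter]; exact ⟨hmem, hc⟩
    rw [h] at this; exact absurd this (List.not_mem_nil)
  rw [chunkOut_eq D hDne]
  by_cases h3 : D.length % 3 = 0
  · rw [if_pos h3, List.append_nil]
  · rw [if_neg h3]
    -- B side: out = preT D ++ ['-'], out[-1] = '-', stripped back to preT D
    rw [PySem.List.pyGet?_neg_one_append_singleton]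
    dsimp only
    rw [if_pos rfl, PySem.List.slice_to_neg_one (preT D ++ ['-']), List.dropLast_concat]
    -- A side: trim ends in the last digit of D, no strip
    rw [PySem.List.pyGet?_neg_one, getLast?_preT D hDne, if_neg h3]
    obtain ⟨x, hx⟩ : ∃ x, D.getLast? = some x := by
      cases hg : D.getLast? with
      | none => exact absurd (List.getLast?_eq_none_iff.mp hg) hDne
      | some x => exact ⟨x, rfl⟩
    rw [hx]
    dsimp only
    have hxd : PySem.Chars.isdigit x = true := by
      have hm : x ∈ D := List.mem_of_getLast? hx
      rw [hD] at hm
      exact (List.mem_filter.mp hm).2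
    rw [if_neg (isdigit_ne_dash hxd)]
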